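-- pv_equiv track=rewrite | github.com/pypi-data/pypi-mirror-402 | packages/TexTOM/textom-0.7.15-py3-none-any.whl/textom/src/model/symmetries.py | get_diffraction_laue_group
-- ===== SOURCE A (Python) =====
-- def get_diffraction_laue_group(space_group_number):
--     """
--     Determine the proper point group from the space group IT number, accounting for equivalent symmetries.
--
--     Parameters:
--         space_group_number (int): The IT number of the space group.
--
--     Returns:
--         str: The proper point group symbol, or "Unknown" for invalid inputs.
--     """
--     # consider also:
--     # from orix.quaternion.symmetry import get_point_group
--
--     # Define ranges of space groups and their proper point groups (reduced symmetry)
--     proper_point_groups = {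
--         "Triclinic": {range(1, 3): "-1"},  # Space groups 1-2
--         "Monoclinic": {range(3, 16): "2/m"},  # Space groups 3-15
--         "Orthorhombic": {range(16, 75): "mmm"},  # Space groups 16-74
--         "Tetragonal": {
--             range(75, 143): "4/mmm",  # Space groups 75-142
--         },
--         "Trigonal": {
--             range(143, 168): "-3m",  # Space groups 143-167
--         },
--         "Hexagonal": {
--             range(168, 195): "6/mmm",  # Space groups 168-194
--         },
--         "Cubic": {
--             range(195, 231): "m3m",  # Space groups 195-206
--         },
--     }
--
--     # Iterate through the dictionary to find the matching range and return the proper point group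
--     for system, groups in proper_point_groups.items():
--         for spg_range, proper_pg in groups.items():
--             if space_group_number in spg_range:
--                 return proper_pg
--
--     return "Unknown"  # For invalid space group numbers
-- ===== SOURCE B (Python) =====
-- # The seven Laue ranges tile 1..230 contiguously, so the answer is determined by
-- # where the number falls among the six interior cut points: binary search.
-- _BOUNDS = [3, 16, 75, 143, 168, 195]
-- _LABELS = ["-1", "2/m", "mmm", "4/mmm", "-3m", "6/mmm", "m3m"]
--
--
-- def get_diffraction_laue_group(space_group_number):
--     """
--     Determine the proper point group from the space group IT number.
--
--     Returns:
--         str: The proper point group symbol, or "Unknown" for invalid inputs.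
--     """
--     if not (1 <= space_group_number < 231):
--         return "Unknown"
--     lo, hi = 0, 6
--     while lo < hi:
--         mid = (lo + hi) // 2
--         if _BOUNDS[mid] <= space_group_number:
--             lo = mid + 1
--         else:
--             hi = mid
--     return _LABELS[lo]
-- ===== Notes on version B (the rewrite author's own statement) =====
-- stated objective: alternative
-- what changed: B exploits that the seven ranges tile 1..230 contiguously: after one bounds check it binary-searches the six interior cut points and indexes a label list, instead of A's linear scan over a dict-of-dicts testing membership in each range object.
import Mathlib
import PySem

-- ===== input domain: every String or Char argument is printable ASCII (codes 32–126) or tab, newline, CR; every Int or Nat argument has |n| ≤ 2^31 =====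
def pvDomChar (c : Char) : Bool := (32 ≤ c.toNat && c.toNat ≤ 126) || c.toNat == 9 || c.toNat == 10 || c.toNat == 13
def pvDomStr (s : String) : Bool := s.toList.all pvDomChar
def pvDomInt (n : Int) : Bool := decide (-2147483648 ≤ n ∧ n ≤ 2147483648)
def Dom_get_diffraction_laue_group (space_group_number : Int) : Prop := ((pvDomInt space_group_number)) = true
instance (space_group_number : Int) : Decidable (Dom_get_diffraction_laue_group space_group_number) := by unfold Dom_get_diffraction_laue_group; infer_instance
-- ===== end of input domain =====

-- B replaces A's linear scan over a dict-of-dicts of range objects with a bounds check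
-- plus a binary search over the six interior cut points of the contiguous ranges
-- (objective: alternative algorithm, same exact values).


-- ===== PORT A =====
-- A's literal dict: crystal system ↦ {range ↦ label}; a range(a, b) is ported as the pair
-- (a, b), and 'n in range(a, b)' (step 1, int n) is exactly a ≤ n ∧ n < b.
def pvProperPointGroups : List (String × List ((Int × Int) × String)) :=
  [ ("Triclinic",    [((1, 3), "-1")]),
    ("Monoclinic",   [((3, 16), "2/m")]),
    ("Orthorhombic", [((16, 75), "mmm")]),
    ("Tetragonal",   [((75, 143), "4/mmm")]),
    ("Trigonal",     [((143, 168), "-3m")]),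
    ("Hexagonal",    [((168, 195), "6/mmm")]),
    ("Cubic",        [((195, 231), "m3m")]) ]

-- inner 'for spg_range, proper_pg in groups.items(): if n in spg_range: return proper_pg'
def pvScanInner (groups : List ((Int × Int) × String)) (n : Int) : Option String :=
  match groups with
  | [] => none
  | (r, pg) :: rest => if r.1 ≤ n ∧ n < r.2 then some pg else pvScanInner rest n

-- outer 'for system, groups in proper_point_groups.items(): …'
def pvScanOuter (d : List (String × List ((Int × Int) × String))) (n : Int) : Option String :=
  match d with
  | [] => none
  | (_, groups) :: rest =>
    match pvScanInner groups n with
    | some pg => some pg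
    | none => pvScanOuter rest n

def get_diffraction_laue_group (space_group_number : Int) : String :=
  (pvScanOuter pvProperPointGroups space_group_number).getD "Unknown"

-- ===== PORT B =====
def pvBounds : List Int := [3, 16, 75, 143, 168, 195]
def pvLabels : List String := ["-1", "2/m", "mmm", "4/mmm", "-3m", "6/mmm", "m3m"]

-- the 'while lo < hi' binary-search loop of Source B; the fuel only bounds the iteration
-- count (hi - lo shrinks each turn and starts at 6, so fuel 6 is never exhausted).
-- lo, hi, mid are the same nonnegative ints as in Source B; Nat '/' = Python '//' here.
-- _BOUNDS[mid] is in range on every reached iteration, so getD's default is never used.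
def pvBisect (n : Int) : Nat → Nat → Nat → Nat
  | 0, lo, _ => lo
  | fuel + 1, lo, hi =>
    if lo < hi then
      let mid := (lo + hi) / 2
      if pvBounds.getD mid 0 ≤ n then pvBisect n fuel (mid + 1) hi
      else pvBisect n fuel lo mid
    else lo

def get_diffraction_laue_group_alt (space_group_number : Int) : String :=
  if 1 ≤ space_group_number ∧ space_group_number < 231 then
    pvLabels.getD (pvBisect space_group_number 6 0 6) "Unknown"
  else "Unknown"

-- ===== PRECONDITION & SPEC =====
def Spec_get_diffraction_laue_group (space_group_number : Int) (out : String) : Prop := out = get_diffraction_laue_group_alt space_group_number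
instance (space_group_number : Int) (out : String) : Decidable (Spec_get_diffraction_laue_group space_group_number out) := by unfold Spec_get_diffraction_laue_group; infer_instance

-- ===== CLAIM (what is proved, stated in full; the proofs are below) =====
def Claim_equal_get_diffraction_laue_group : Prop := ∀ (space_group_number : Int), Dom_get_diffraction_laue_group space_group_number → Spec_get_diffraction_laue_group space_group_number (get_diffraction_laue_group space_group_number)

-- ===== LEMMAS AND PROOFS =====

-- ===== VERDICT (by name: the statement is the Claim_ definition above) =====
theorem get_diffraction_laue_group_spec : Claim_equal_get_diffraction_laue_group := by
  intro n _
  unfold Spec_get_diffraction_laue_group get_diffraction_laue_group get_diffraction_laue_group_alt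
  by_cases h1 : 1 ≤ n ∧ n < 3
  · simp [pvScanOuter, pvScanInner, pvProperPointGroups, pvBisect, pvBounds, pvLabels,
      show (1 : Int) ≤ n ∧ n < 231 by omega,
      show (1 : Int) ≤ n by omega,
      show ¬(n < (1 : Int)) by omega,
      show ¬((3 : Int) ≤ n) by omega,
      show n < (3 : Int) by omega,
      show ¬((16 : Int) ≤ n) by omega,
      show n < (16 : Int) by omega,
      show ¬((75 : Int) ≤ n) by omega,
      show n < (75 : Int) by omega,
      show ¬((143 : Int) ≤ n) by omega,
      show n < (143 : Int) by omega,
      show ¬((168 : Int) ≤ n) by omega,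
      show n < (168 : Int) by omega,
      show ¬((195 : Int) ≤ n) by omega,
      show n < (195 : Int) by omega,
      show ¬((231 : Int) ≤ n) by omega,
      show n < (231 : Int) by omega]
  by_cases h2 : 3 ≤ n ∧ n < 16
  · simp [pvScanOuter, pvScanInner, pvProperPointGroups, pvBisect, pvBounds, pvLabels,
      show (1 : Int) ≤ n ∧ n < 231 by omega,
      show (1 : Int) ≤ n by omega,
      show ¬(n < (1 : Int)) by omega,
      show (3 : Int) ≤ n by omega,
      show ¬(n < (3 : Int)) by omega,
      show ¬((16 : Int) ≤ n) by omega,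
      show n < (16 : Int) by omega,
      show ¬((75 : Int) ≤ n) by omega,
      show n < (75 : Int) by omega,
      show ¬((143 : Int) ≤ n) by omega,
      show n < (143 : Int) by omega,
      show ¬((168 : Int) ≤ n) by omega,
      show n < (168 : Int) by omega,
      show ¬((195 : Int) ≤ n) by omega,
      show n < (195 : Int) by omega,
      show ¬((231 : Int) ≤ n) by omega,
      show n < (231 : Int) by omega]
  by_cases h3 : 16 ≤ n ∧ n < 75
  · simp [pvScanOuter, pvScanInner, pvProperPointGroups, pvBisect, pvBounds, pvLabels,
      show (1 : Int) ≤ n ∧ n < 231 by omega,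
      show (1 : Int) ≤ n by omega,
      show ¬(n < (1 : Int)) by omega,
      show (3 : Int) ≤ n by omega,
      show ¬(n < (3 : Int)) by omega,
      show (16 : Int) ≤ n by omega,
      show ¬(n < (16 : Int)) by omega,
      show ¬((75 : Int) ≤ n) by omega,
      show n < (75 : Int) by omega,
      show ¬((143 : Int) ≤ n) by omega,
      show n < (143 : Int) by omega,
      show ¬((168 : Int) ≤ n) by omega,
      show n < (168 : Int) by omega,
      show ¬((195 : Int) ≤ n) by omega,
      show n < (195 : Int) by omega,
      show ¬((231 : Int) ≤ n) by omega,
      show n < (231 : Int) by omega]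
  by_cases h4 : 75 ≤ n ∧ n < 143
  · simp [pvScanOuter, pvScanInner, pvProperPointGroups, pvBisect, pvBounds, pvLabels,
      show (1 : Int) ≤ n ∧ n < 231 by omega,
      show (1 : Int) ≤ n by omega,
      show ¬(n < (1 : Int)) by omega,
      show (3 : Int) ≤ n by omega,
      show ¬(n < (3 : Int)) by omega,
      show (16 : Int) ≤ n by omega,
      show ¬(n < (16 : Int)) by omega,
      show (75 : Int) ≤ n by omega,
      show ¬(n < (75 : Int)) by omega,
      show ¬((143 : Int) ≤ n) by omega,
      show n < (143 : Int) by omega,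
      show ¬((168 : Int) ≤ n) by omega,
      show n < (168 : Int) by omega,
      show ¬((195 : Int) ≤ n) by omega,
      show n < (195 : Int) by omega,
      show ¬((231 : Int) ≤ n) by omega,
      show n < (231 : Int) by omega]
  by_cases h5 : 143 ≤ n ∧ n < 168
  · simp [pvScanOuter, pvScanInner, pvProperPointGroups, pvBisect, pvBounds, pvLabels,
      show (1 : Int) ≤ n ∧ n < 231 by omega,
      show (1 : Int) ≤ n by omega,
      show ¬(n < (1 : Int)) by omega,
      show (3 : Int) ≤ n by omega,
      show ¬(n < (3 : Int)) by omega,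
      show (16 : Int) ≤ n by omega,
      show ¬(n < (16 : Int)) by omega,
      show (75 : Int) ≤ n by omega,
      show ¬(n < (75 : Int)) by omega,
      show (143 : Int) ≤ n by omega,
      show ¬(n < (143 : Int)) by omega,
      show ¬((168 : Int) ≤ n) by omega,
      show n < (168 : Int) by omega,
      show ¬((195 : Int) ≤ n) by omega,
      show n < (195 : Int) by omega,
      show ¬((231 : Int) ≤ n) by omega,
      show n < (231 : Int) by omega]
  by_cases h6 : 168 ≤ n ∧ n < 195
  · simp [pvScanOuter, pvScanInner, pvProperPointGroups, pvBisect, pvBounds, pvLabels,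
      show (1 : Int) ≤ n ∧ n < 231 by omega,
      show (1 : Int) ≤ n by omega,
      show ¬(n < (1 : Int)) by omega,
      show (3 : Int) ≤ n by omega,
      show ¬(n < (3 : Int)) by omega,
      show (16 : Int) ≤ n by omega,
      show ¬(n < (16 : Int)) by omega,
      show (75 : Int) ≤ n by omega,
      show ¬(n < (75 : Int)) by omega,
      show (143 : Int) ≤ n by omega,
      show ¬(n < (143 : Int)) by omega,
      show (168 : Int) ≤ n by omega,
      show ¬(n < (168 : Int)) by omega,
      show ¬((195 : Int) ≤ n) by omega,
      show n < (195 : Int) by omega,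
      show ¬((231 : Int) ≤ n) by omega,
      show n < (231 : Int) by omega]
  by_cases h7 : 195 ≤ n ∧ n < 231
  · simp [pvScanOuter, pvScanInner, pvProperPointGroups, pvBisect, pvBounds, pvLabels,
      show (1 : Int) ≤ n ∧ n < 231 by omega,
      show (1 : Int) ≤ n by omega,
      show ¬(n < (1 : Int)) by omega,
      show (3 : Int) ≤ n by omega,
      show ¬(n < (3 : Int)) by omega,
      show (16 : Int) ≤ n by omega,
      show ¬(n < (16 : Int)) by omega,
      show (75 : Int) ≤ n by omega,
      show ¬(n < (75 : Int)) by omega,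
      show (143 : Int) ≤ n by omega,
      show ¬(n < (143 : Int)) by omega,
      show (168 : Int) ≤ n by omega,
      show ¬(n < (168 : Int)) by omega,
      show (195 : Int) ≤ n by omega,
      show ¬(n < (195 : Int)) by omega,
      show ¬((231 : Int) ≤ n) by omega,
      show n < (231 : Int) by omega]
  · simp [pvScanOuter, pvScanInner, pvProperPointGroups,
      show ¬((1:Int) ≤ n ∧ n < 231) by omega,
      h1, h2, h3, h4, h5, h6, h7]
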